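-- pv_equiv track=rewrite | github.com/reborncodelover/CodingBat | xyz_there.py | xyz_there
-- ===== SOURCE A (Python) =====
-- def xyz_there(str):
-- 	'''
-- 	Return True if the given string contains an appearance of "xyz" where the xyz is not directly preceeded
-- 	by a period (.). So "xxyz" counts but "x.xyz" does not.
--
-- 	xyz_there('abcxyz') --> True
-- 	xyz_there('abc.xyz') --> False
-- 	xyz_there('xyz.abc') --> True
-- 	'''
-- 	count = 0
-- 	prev_char = ""
-- 	for i in range(len(str) - 2):
-- 		substr = str[i:i+3]
-- 		if substr == "xyz" and prev_char != ".":
-- 			return True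
-- 		prev_char = str[i]
-- 	return False
-- ===== SOURCE B (Python) =====
-- def xyz_there(str):
--     t = str
--     while t:
--         if t.startswith('xyz'):
--             return True
--         if t.startswith('.xyz'):
--             t = t[4:]
--         else:
--             t = t[1:]
--     return False
-- ===== Notes on version B (the rewrite author's own statement) =====
-- stated objective: alternative
-- what changed: Replaces A's index loop over range(len-2) with slicing and a prev_char state variable by a suffix scan that tests startswith('xyz')/startswith('.xyz') and advances with a variable stride (4 over a period-guarded match, else 1), with no index arithmetic and no prev-char state.
import Mathlib
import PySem

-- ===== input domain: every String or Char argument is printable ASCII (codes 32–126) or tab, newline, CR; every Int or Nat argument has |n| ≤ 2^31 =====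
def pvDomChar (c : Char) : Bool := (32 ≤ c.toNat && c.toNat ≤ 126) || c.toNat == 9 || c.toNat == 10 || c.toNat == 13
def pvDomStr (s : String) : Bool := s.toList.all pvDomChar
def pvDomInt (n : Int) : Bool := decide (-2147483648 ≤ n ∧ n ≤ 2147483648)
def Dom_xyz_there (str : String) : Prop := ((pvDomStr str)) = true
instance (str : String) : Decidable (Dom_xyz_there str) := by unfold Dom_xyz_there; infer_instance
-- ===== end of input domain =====

-- B replaces A's index loop with prev-char state by a suffix scan using startswith and a
-- variable stride (skip 4 over a '.xyz' occurrence, else 1); objective: alternative/idiomatic.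

-- ===== PORT A =====
-- for i in range(len(str)-2): substr = str[i:i+3]; early return on match with prev_char != ".".
-- prev_char (a Python string, "" initially, then str[i]) is modelled as a List Char.
-- str[i] is always in range when executed (i < len-2), so the total pyGetD is exact here.
def xyzLoopA (cs : List Char) : List Int → List Char → Bool
  | [], _ => false
  | i :: rest, prev =>
    let substr := PySem.List.slice cs (some i) (some (i + 3))
    if substr = ['x', 'y', 'z'] ∧ prev ≠ ['.'] then true
    else xyzLoopA cs rest [PySem.List.pyGetD cs i ' ']

def xyz_there (str : String) : Bool :=
  xyzLoopA str.toList (PySem.List.pyRange 0 ((str.toList.length : Int) - 2)) []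

-- ===== PORT B =====
-- while t: if t.startswith('xyz'): return True; t = t[4:] if t.startswith('.xyz') else t[1:]
-- on a nonempty c :: cs, t[4:] = cs.drop 3 and t[1:] = cs (exact: the slice indices are nonnegative).
def altScan : List Char → Bool
  | [] => false
  | c :: cs =>
    if PySem.Chars.startswith (c :: cs) ['x', 'y', 'z'] then true
    else if PySem.Chars.startswith (c :: cs) ['.', 'x', 'y', 'z'] then altScan (cs.drop 3)
    else altScan cs
termination_by t => t.length
decreasing_by
  · simp only [List.length_cons, List.length_drop]; omega
  · simp

def xyz_there_alt (str : String) : Bool := altScan str.toList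

-- ===== PRECONDITION & SPEC =====
def Spec_xyz_there (str : String) (out : Bool) : Prop := out = xyz_there_alt str
instance (str : String) (out : Bool) : Decidable (Spec_xyz_there str out) := by unfold Spec_xyz_there; infer_instance

-- ===== CLAIM (what is proved, stated in full; the proofs are below) =====
def Claim_equal_xyz_there : Prop := ∀ (str : String), Dom_xyz_there str → Spec_xyz_there str (xyz_there str)

-- ===== LEMMAS AND PROOFS =====

-- proof-only intermediate scanner: A's loop seen on the suffix str[i:], carrying prev_char
def pvScan : List Char → List Char → Bool
  | a :: b :: c :: r, prev =>
    if [a, b, c] = ['x', 'y', 'z'] ∧ prev ≠ ['.'] then true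
    else pvScan (b :: c :: r) [a]
  | _, _ => false

lemma pvScan_short (t prev : List Char) (h : t.length < 3) : pvScan t prev = false := by
  match t with
  | [] => rfl
  | [a] => rfl
  | [a, b] => rfl
  | a :: b :: c :: r => simp at h; omega

lemma sw_window (a b c : Char) (r : List Char) :
    PySem.Chars.startswith (a :: b :: c :: r) ['x', 'y', 'z'] = true ↔
      (a = 'x' ∧ b = 'y' ∧ c = 'z') := by
  simp [PySem.Chars.startswith, List.isPrefixOf]
  tauto

lemma sw_head_false (x a : Char) (p s : List Char) (h : a ≠ x) :
    PySem.Chars.startswith (a :: s) (x :: p) = false := by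
  simp [PySem.Chars.startswith, List.isPrefixOf]
  intro hx
  exact absurd hx.symm h

lemma sw_cons_cons (a : Char) (p s : List Char) :
    PySem.Chars.startswith (a :: s) (a :: p) = PySem.Chars.startswith s p := by
  simp [PySem.Chars.startswith, List.isPrefixOf]

lemma sw_short (p s : List Char) (h : s.length < p.length) :
    PySem.Chars.startswith s p = false := by
  by_contra hc
  have : p <+: s := by
    have := List.isPrefixOf_iff_prefix.mp (Bool.not_eq_false _ |>.mp hc)
    exact this
  exact absurd this.length_le (by omega)

lemma altScan_cons (a : Char) (rest : List Char) :
    altScan (a :: rest) =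
      (if PySem.Chars.startswith (a :: rest) ['x', 'y', 'z'] then true
       else if PySem.Chars.startswith (a :: rest) ['.', 'x', 'y', 'z'] then altScan (rest.drop 3)
       else altScan rest) := by
  rw [altScan]

lemma altScan_step (a : Char) (rest : List Char)
    (h3 : PySem.Chars.startswith (a :: rest) ['x', 'y', 'z'] = false)
    (h4 : PySem.Chars.startswith (a :: rest) ['.', 'x', 'y', 'z'] = false) :
    altScan (a :: rest) = altScan rest := by
  rw [altScan_cons, h3, h4]
  simp

lemma altScan_short (t : List Char) (h : t.length < 3) : altScan t = false := by
  match t with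
  | [] => rw [altScan]
  | [a] =>
    rw [altScan_step a [] (sw_short _ _ (by simp)) (sw_short _ _ (by simp)), altScan]
  | [a, b] =>
    rw [altScan_step a [b] (sw_short _ _ (by simp)) (sw_short _ _ (by simp)),
        altScan_step b [] (sw_short _ _ (by simp)) (sw_short _ _ (by simp)), altScan]
  | a :: b :: c :: r => simp at h; omega

-- joint induction relating A's prev-char scan to B's stride scan
lemma pvScan_eq_altScan : ∀ (n : Nat) (t : List Char), t.length ≤ n →
    (∀ prev, prev ≠ ['.'] → pvScan t prev = altScan t) ∧
    (pvScan t ['.'] = altScan ('.' :: t)) := by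
  intro n
  induction n with
  | zero =>
    intro t ht
    have h0 : t = [] := List.eq_nil_of_length_eq_zero (Nat.le_zero.mp ht)
    subst h0
    constructor
    · intro prev _
      rw [pvScan_short _ _ (by simp), altScan_short _ (by simp)]
    · rw [pvScan_short _ _ (by simp), altScan_short _ (by simp)]
  | succ n ih =>
    intro t ht
    match t with
    | [] =>
      constructor
      · intro prev _
        rw [pvScan_short _ _ (by simp), altScan_short _ (by simp)]
      · rw [pvScan_short _ _ (by simp), altScan_short _ (by simp)]
    | [a] =>
      constructor
      · intro prev _
        rw [pvScan_short _ _ (by simp), altScan_short _ (by simp)]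
      · rw [pvScan_short _ _ (by simp), altScan_short _ (by simp)]
    | [a, b] =>
      constructor
      · intro prev _
        rw [pvScan_short _ _ (by simp), altScan_short _ (by simp)]
      · rw [pvScan_short _ _ (by simp),
            altScan_step '.' [a, b] (sw_head_false _ _ _ _ (by decide)) (sw_short _ _ (by simp)),
            altScan_short _ (by simp)]
    | a :: b :: c :: r =>
      have hlen : (b :: c :: r).length ≤ n := by simp at ht ⊢; omega
      have ihr := ih (b :: c :: r) hlen
      by_cases h1 : [a, b, c] = ['x', 'y', 'z']
      · -- the window at the head matches "xyz"
        obtain ⟨ha, hb, hc⟩ : a = 'x' ∧ b = 'y' ∧ c = 'z' := by simpa using h1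
        subst ha; subst hb; subst hc
        have hsw : PySem.Chars.startswith ('x' :: 'y' :: 'z' :: r) ['x', 'y', 'z'] = true :=
          (sw_window _ _ _ _).mpr ⟨rfl, rfl, rfl⟩
        constructor
        · intro prev hprev
          rw [show pvScan ('x' :: 'y' :: 'z' :: r) prev = true by
                rw [pvScan]; simp [hprev]]
          rw [altScan_cons, hsw]
          simp
        · -- prev = ".": A skips this match, B jumps over ".xyz"
          have step : pvScan ('x' :: 'y' :: 'z' :: r) ['.'] = pvScan ('y' :: 'z' :: r) ['x'] := by
            rw [pvScan]; simp
          rw [step, ihr.1 ['x'] (by decide)]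
          have e1 : altScan ('y' :: 'z' :: r) = altScan ('z' :: r) :=
            altScan_step _ _ (sw_head_false _ _ _ _ (by decide)) (sw_head_false _ _ _ _ (by decide))
          have e2 : altScan ('z' :: r) = altScan r :=
            altScan_step _ _ (sw_head_false _ _ _ _ (by decide)) (sw_head_false _ _ _ _ (by decide))
          rw [e1, e2]
          rw [altScan_cons '.' ('x' :: 'y' :: 'z' :: r),
              sw_head_false 'x' '.' _ _ (by decide),
              show PySem.Chars.startswith ('.' :: 'x' :: 'y' :: 'z' :: r) ['.', 'x', 'y', 'z'] = true by
                rw [sw_cons_cons]; exact hsw]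
          simp
      · -- no match at the head
        have step : ∀ prev, pvScan (a :: b :: c :: r) prev = pvScan (b :: c :: r) [a] := by
          intro prev; rw [pvScan]; simp [h1]
        have hno3 : PySem.Chars.startswith (a :: b :: c :: r) ['x', 'y', 'z'] = false := by
          by_contra hc'
          exact h1 (by
            obtain ⟨h1', h2', h3'⟩ := (sw_window a b c r).mp (Bool.not_eq_false _ |>.mp hc')
            simp [h1', h2', h3'])
        have hdotstep : altScan ('.' :: a :: b :: c :: r) = altScan (a :: b :: c :: r) := by
          refine altScan_step _ _ (sw_head_false _ _ _ _ (by decide)) ?_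
          rw [sw_cons_cons]
          exact hno3
        by_cases ha : a = '.'
        · subst ha
          have key : pvScan (b :: c :: r) ['.'] = altScan ('.' :: b :: c :: r) := ihr.2
          constructor
          · intro prev _
            rw [step prev, key]
          · rw [step ['.'], key, hdotstep]
        · have key : pvScan (b :: c :: r) [a] = altScan (b :: c :: r) :=
            ihr.1 [a] (by simp [ha])
          have halt : altScan (a :: b :: c :: r) = altScan (b :: c :: r) :=
            altScan_step _ _ hno3 (sw_head_false _ _ _ _ ha)
          constructor
          · intro prev _
            rw [step prev, key, halt]
          · rw [step ['.'], key, hdotstep, halt]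

-- A's range loop computes pvScan on the suffix str[k:]
lemma xyzLoopA_eq_pvScan : ∀ (n : Nat) (cs : List Char) (k : Nat) (prev : List Char),
    cs.length ≤ k + n →
    xyzLoopA cs (PySem.List.pyRange (k : Int) ((cs.length : Int) - 2)) prev
      = pvScan (cs.drop k) prev := by
  intro n
  induction n with
  | zero =>
    intro cs k prev h
    rw [PySem.List.pyRange_one_eq_nil (by omega)]
    rw [pvScan_short _ _ (by simp; omega)]
    rfl
  | succ n ih =>
    intro cs k prev h
    by_cases hk : (k : Int) < (cs.length : Int) - 2
    · have hk3 : k + 3 ≤ cs.length := by omega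
      rw [PySem.List.pyRange_one_cons hk]
      rw [xyzLoopA]
      have hsub : PySem.List.slice cs (some (k : Int)) (some ((k : Int) + 3))
          = List.take 3 (List.drop k cs) := by
        have hcast : ((k : Int) + 3) = ((k + 3 : Nat) : Int) := by push_cast; ring
        rw [hcast, PySem.List.slice_natCast]
        congr 1
        omega
      have hd0 : cs.drop k = cs[k] :: cs.drop (k + 1) :=
        (List.getElem_cons_drop (by omega)).symm
      have hd1 : cs.drop (k + 1) = cs[k + 1] :: cs.drop (k + 2) :=
        (List.getElem_cons_drop (by omega)).symm
      have hd2 : cs.drop (k + 2) = cs[k + 2] :: cs.drop (k + 3) :=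
        (List.getElem_cons_drop (by omega)).symm
      have hget : PySem.List.pyGetD cs (k : Int) ' ' = cs[k] := by
        rw [PySem.List.pyGetD_natCast, List.getD_eq_getElem _ _ (by omega)]
      have hrange : (k : Int) + 1 = ((k + 1 : Nat) : Int) := by push_cast; ring
      rw [hsub, hget, hrange, ih cs (k + 1) ([cs[k]]) (by omega)]
      rw [hd0, hd1, hd2]
      simp only [List.take_succ_cons, List.take_zero]
      rw [pvScan]
      rfl
    · rw [PySem.List.pyRange_one_eq_nil (by omega)]
      rw [pvScan_short _ _ (by simp; omega)]
      rfl

-- ===== VERDICT (by name: the statement is the Claim_ definition above) =====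
theorem xyz_there_spec : Claim_equal_xyz_there := by
  intro s _
  unfold Spec_xyz_there xyz_there xyz_there_alt
  rw [show (0 : Int) = ((0 : Nat) : Int) by rfl]
  rw [xyzLoopA_eq_pvScan s.toList.length s.toList 0 [] (by omega)]
  simp only [List.drop_zero]
  exact (pvScan_eq_altScan s.toList.length s.toList le_rfl).1 [] (by decide)
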